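-- pv_equiv track=rewrite | github.com/MrBrantCode/unitest_baseline | mut_generate/mist_train_cf/cf_143/solution.py | reorder_specialized
-- ===== SOURCE A (Python) =====
-- def is_prime(num):
--     if num < 2:
--         return False
--     for i in range(2, int(num ** 0.5) + 1):
--         if num % i == 0:
--             return False
--     return True
--
-- def reorder_specialized(arr):
--     primes = []
--     nonPrimes = []
--
--     for num in arr:
--         if is_prime(num):
--             primes.append(num)
--         else:
--             nonPrimes.append(num)
--
--     result = primes + nonPrimes
--     return result
-- ===== SOURCE B (Python) =====
-- def is_prime(num):
--     if num < 2:
--         return False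
--     for i in range(2, int(num ** 0.5) + 1):
--         if num % i == 0:
--             return False
--     return True
--
-- def reorder_specialized(arr):
--     # one stable sort: primes (key False) before non-primes (key True),
--     # original order preserved within each group
--     return sorted(arr, key=lambda x: not is_prime(x))
-- ===== Notes on version B (the rewrite author's own statement) =====
-- stated objective: idiomatic
-- what changed: Replaces the two manually-built accumulator lists and concatenation with a single stable sort keyed on not is_prime(x), which groups primes first while preserving relative order.
import Mathlib
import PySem

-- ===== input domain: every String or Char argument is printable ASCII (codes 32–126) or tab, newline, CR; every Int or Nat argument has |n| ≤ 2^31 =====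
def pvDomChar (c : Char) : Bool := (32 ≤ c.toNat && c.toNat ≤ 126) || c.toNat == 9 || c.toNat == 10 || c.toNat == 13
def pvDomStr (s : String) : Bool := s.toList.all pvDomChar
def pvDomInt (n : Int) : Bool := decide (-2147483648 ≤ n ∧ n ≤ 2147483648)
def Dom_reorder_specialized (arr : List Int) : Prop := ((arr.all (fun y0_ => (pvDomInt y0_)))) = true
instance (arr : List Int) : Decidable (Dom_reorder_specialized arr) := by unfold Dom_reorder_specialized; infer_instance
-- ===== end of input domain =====

-- B replaces A's two accumulator lists with one stable sort keyed on not-is_prime (idiomatic, same cost).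


-- ===== PORT A =====
-- shared helper is_prime (same source text in Source A and Source B).
-- int(num ** 0.5) is ported as Nat.sqrt num.toNat: exact for 0 ≤ num ≤ 2^31 (double sqrt
-- is correctly rounded and cannot cross an integer below a perfect square in this range);
-- the branch is only reached for num ≥ 2.
def pv_is_prime (num : Int) : Bool :=
  if num < 2 then false
  else (PySem.List.pyRange 2 ((Nat.sqrt num.toNat : Int) + 1) 1).all
         (fun i => !(PySem.Int.mod num i == 0))

def reorder_specialized (arr : List Int) : List Int :=
  let pn := arr.foldl
    (fun (acc : List Int × List Int) num =>
      if pv_is_prime num then (acc.1 ++ [num], acc.2) else (acc.1, acc.2 ++ [num]))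
    ([], [])
  pn.1 ++ pn.2

-- ===== PORT B =====
def reorder_specialized_alt (arr : List Int) : List Int :=
  PySem.List.sorted arr (fun x => !pv_is_prime x) false

-- ===== PRECONDITION & SPEC =====
def Spec_reorder_specialized (arr : List Int) (out : List Int) : Prop := out = reorder_specialized_alt arr
instance (arr : List Int) (out : List Int) : Decidable (Spec_reorder_specialized arr out) := by unfold Spec_reorder_specialized; infer_instance

-- ===== CLAIM (what is proved, stated in full; the proofs are below) =====
def Claim_equal_reorder_specialized : Prop := ∀ (arr : List Int), Dom_reorder_specialized arr → Spec_reorder_specialized arr (reorder_specialized arr)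

-- ===== LEMMAS AND PROOFS =====

-- A's loop: the pair accumulator collects the prime and non-prime sublists in order.
theorem pvA_foldl (arr P N : List Int) :
    arr.foldl
      (fun (acc : List Int × List Int) num =>
        if pv_is_prime num then (acc.1 ++ [num], acc.2) else (acc.1, acc.2 ++ [num]))
      (P, N)
    = (P ++ arr.filter pv_is_prime, N ++ arr.filter (fun x => !pv_is_prime x)) := by
  induction arr generalizing P N with
  | nil => simp
  | cons x xs ih =>
    by_cases h : pv_is_prime x = true <;>
      simp [List.foldl_cons, h, ih]

-- B's stable insertion of a prime lands right after the prime block.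
theorem pv_insertBy_prime (x : Int) (hx : pv_is_prime x = true) (P N : List Int)
    (hP : ∀ p ∈ P, pv_is_prime p = true) (hN : ∀ n ∈ N, pv_is_prime n = false) :
    PySem.List.insertBy
      (fun a b => decide ((!pv_is_prime a) < (!pv_is_prime b))) x (P ++ N)
    = P ++ x :: N := by
  induction P with
  | nil =>
    cases N with
    | nil => simp [PySem.List.insertBy]
    | cons n ns =>
      have hn := hN n (by simp)
      simp [PySem.List.insertBy, hx, hn, Bool.lt_iff]
  | cons p ps ih =>
    have hp := hP p (by simp)
    have hps : ∀ q ∈ ps, pv_is_prime q = true := fun q hq => hP q (by simp [hq])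
    have ih' := ih hps
    rw [show (fun a b => decide ((!pv_is_prime a) < !pv_is_prime b))
          = (fun a b => pv_is_prime a && !pv_is_prime b) from
        funext fun a => funext fun b => by
          cases pv_is_prime a <;> cases pv_is_prime b <;> decide] at ih'
    simp only [List.cons_append, PySem.List.insertBy, hx, hp, Bool.lt_iff]
    simp [ih']

-- B's stable insertion of a non-prime goes to the very end.
theorem pv_insertBy_nonprime (x : Int) (hx : pv_is_prime x = false) (ys : List Int) :
    PySem.List.insertBy
      (fun a b => decide ((!pv_is_prime a) < (!pv_is_prime b))) x ys
    = ys ++ [x] := by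
  apply PySem.List.insertBy_of_forall_not_before
  intro y _
  simp [hx, Bool.lt_iff]

-- Invariant of B's sort loop over a prime-block ++ non-prime-block accumulator.
theorem pvB_foldl (arr P N : List Int)
    (hP : ∀ p ∈ P, pv_is_prime p = true) (hN : ∀ n ∈ N, pv_is_prime n = false) :
    arr.foldl
      (fun acc x =>
        PySem.List.insertBy
          (fun a b => decide ((!pv_is_prime a) < (!pv_is_prime b))) x acc)
      (P ++ N)
    = (P ++ arr.filter pv_is_prime) ++ (N ++ arr.filter (fun x => !pv_is_prime x)) := by
  induction arr generalizing P N with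
  | nil => simp
  | cons x xs ih =>
    by_cases h : pv_is_prime x = true
    · have h1 : ∀ p ∈ P ++ [x], pv_is_prime p = true := by
        intro p hp
        rcases List.mem_append.mp hp with hp | hp
        · exact hP p hp
        · simp only [List.mem_singleton] at hp; subst hp; exact h
      rw [List.foldl_cons, pv_insertBy_prime x h P N hP hN,
          show P ++ x :: N = (P ++ [x]) ++ N by simp, ih (P ++ [x]) N h1 hN]
      simp [h]
    · simp only [Bool.not_eq_true] at h
      have h1 : ∀ n ∈ N ++ [x], pv_is_prime n = false := by
        intro n hn
        rcases List.mem_append.mp hn with hn | hn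
        · exact hN n hn
        · simp only [List.mem_singleton] at hn; subst hn; exact h
      rw [List.foldl_cons, pv_insertBy_nonprime x h (P ++ N),
          show (P ++ N) ++ [x] = P ++ (N ++ [x]) by simp, ih P (N ++ [x]) hP h1]
      simp [h]

-- ===== VERDICT (by name: the statement is the Claim_ definition above) =====
theorem reorder_specialized_spec : Claim_equal_reorder_specialized := by
  intro arr _
  unfold Spec_reorder_specialized reorder_specialized reorder_specialized_alt
  rw [PySem.List.sorted_eq_foldl_insertBy]
  have hB := pvB_foldl arr [] [] (by simp) (by simp)
  simp only [List.nil_append] at hB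
  rw [hB]
  have hA := pvA_foldl arr [] []
  simp only [List.nil_append] at hA
  simp [hA]
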